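-- pv_equiv track=rewrite | github.com/taiwanfifi/CarbonStack | experiment_results/run_hls_pragma_v2.py | merge_pragmas
-- ===== SOURCE A (Python) =====
-- def merge_pragmas(original_code, llm_code):
--     """
--     Post-process merge: take pragma lines from LLM output,
--     put them back into the original code structure.
--     Guarantees 100% code preservation.
--     """
--     orig_lines = original_code.split('\n')
--     llm_lines = llm_code.split('\n') if llm_code else []
--
--     # Extract pragma lines from LLM output (in order)
--     llm_pragmas = [l.strip() for l in llm_lines if '#pragma HLS' in l]
--
--     # Find pragma positions in original code
--     pragma_positions = []
--     for i, line in enumerate(orig_lines):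
--         if '#pragma HLS' in line:
--             pragma_positions.append(i)
--
--     # Replace original pragmas with LLM pragmas (1:1 mapping)
--     merged = orig_lines.copy()
--     for pos_idx, orig_pos in enumerate(pragma_positions):
--         if pos_idx < len(llm_pragmas):
--             # Preserve original indentation
--             indent = len(orig_lines[orig_pos]) - len(orig_lines[orig_pos].lstrip())
--             merged[orig_pos] = ' ' * indent + llm_pragmas[pos_idx]
--
--     # If LLM produced MORE pragmas than original, append extras near loops
--     # (simplified: just note it, don't insert randomly)
--     extra_pragmas = llm_pragmas[len(pragma_positions):]
--
--     return '\n'.join(merged), len(extra_pragmas)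
-- ===== SOURCE B (Python) =====
-- def merge_pragmas(original_code, llm_code):
--     llm_lines = llm_code.split('\n') if llm_code else []
--     llm_pragmas = [l.strip() for l in llm_lines if '#pragma HLS' in l]
--
--     # Partition the original lines into gaps (runs of non-pragma lines)
--     # and the pragma lines themselves.
--     gaps, prags, cur = [], [], []
--     for line in original_code.split('\n'):
--         if '#pragma HLS' in line:
--             gaps.append(cur)
--             prags.append(line)
--             cur = []
--         else:
--             cur.append(line)
--     gaps.append(cur)
--
--     # Transform the pragma list: zip against the LLM pragmas (keeping the
--     # original indentation width), pad with the untouched originals.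
--     new_prags = [' ' * (len(p) - len(p.lstrip())) + q
--                  for p, q in zip(prags, llm_pragmas)] + prags[len(llm_pragmas):]
--
--     # Interleave gaps and new pragma lines back into one list of lines.
--     merged = gaps[0][:]
--     for p, g in zip(new_prags, gaps[1:]):
--         merged.append(p)
--         merged.extend(g)
--
--     return '\n'.join(merged), max(0, len(llm_pragmas) - len(prags))
-- ===== Notes on version B (the rewrite author's own statement) =====
-- stated objective: alternative
-- what changed: Instead of A's scheme of collecting pragma line indices and overwriting those positions in a copy of the line list, B partitions the original lines into non-pragma gaps and the pragma lines, rewrites the pragma list by zipping it with the LLM pragmas (padding with the untouched originals), and interleaves gaps and rewritten pragmas back together; the extras count is max(0, len(llm_pragmas) - len(prags)).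
import Mathlib
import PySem

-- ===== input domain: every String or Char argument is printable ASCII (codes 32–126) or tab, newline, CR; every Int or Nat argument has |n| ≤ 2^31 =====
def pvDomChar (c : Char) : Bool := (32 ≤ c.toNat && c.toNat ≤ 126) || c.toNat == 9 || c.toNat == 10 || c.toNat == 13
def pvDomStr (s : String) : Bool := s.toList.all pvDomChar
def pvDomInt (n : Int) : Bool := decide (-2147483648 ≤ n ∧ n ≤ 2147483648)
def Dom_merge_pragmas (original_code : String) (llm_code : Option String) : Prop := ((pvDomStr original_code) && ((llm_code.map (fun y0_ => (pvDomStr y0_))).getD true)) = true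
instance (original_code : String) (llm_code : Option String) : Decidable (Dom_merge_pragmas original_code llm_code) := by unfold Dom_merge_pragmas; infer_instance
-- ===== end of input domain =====

-- B replaces A's index-based overwrite (collect pragma positions, overwrite those positions in a
-- copy) by partition into gaps / pragma lines, a zip-rewrite of the pragma list, and an
-- interleave; objective: alternative. Return value only.

-- shared constant: the marker substring '#pragma HLS'
def pvPrag : List Char := "#pragma HLS".toList

-- ===== PORT A =====
def merge_pragmas (original_code : String) (llm_code : Option String) : String × Int :=
  let orig_lines : List (List Char) := PySem.Chars.splitOn original_code.toList ['\n']
  let llm_lines : List (List Char) :=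
    match llm_code with
    | none => []
    | some s => if s = "" then [] else PySem.Chars.splitOn s.toList ['\n']
  let llm_pragmas : List (List Char) :=
    (llm_lines.filter (fun l => PySem.Chars.isIn pvPrag l)).map PySem.Chars.strip
  let pragma_positions : List Int :=
    (PySem.List.enumerate orig_lines 0).foldl
      (fun acc ip => if PySem.Chars.isIn pvPrag ip.2 then acc ++ [ip.1] else acc) []
  let merged : List (List Char) :=
    (PySem.List.enumerate pragma_positions 0).foldl
      (fun m kp =>
        if kp.1 < (llm_pragmas.length : Int) then
          let line := PySem.List.pyGetD orig_lines kp.2 []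
          let indent := line.length - (PySem.Chars.lstrip line).length
          PySem.List.pySetD m kp.2 (List.replicate indent ' ' ++ PySem.List.pyGetD llm_pragmas kp.1 [])
        else m) orig_lines
  let extra_pragmas := PySem.List.slice llm_pragmas (some (pragma_positions.length : Int)) none
  (String.ofList (PySem.Chars.join ['\n'] merged), (extra_pragmas.length : Int))

-- ===== PORT B =====
-- B's partition loop: split lines into gaps (runs of non-pragma lines) and the pragma lines
def pvPart : List (List Char) → List (List (List Char)) × List (List Char)
  | [] => ([[]], [])
  | l :: r =>
    let gp := pvPart r
    if PySem.Chars.isIn pvPrag l then ([] :: gp.1, l :: gp.2)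
    else ((l :: gp.1.headD []) :: gp.1.tail, gp.2)

-- B's interleave loop: zip(new_prags, gaps[1:]) flattened
def pvWeave : List (List Char) → List (List (List Char)) → List (List Char)
  | [], _ => []
  | _ :: _, [] => []
  | p :: ps, g :: gs => p :: (g ++ pvWeave ps gs)

def merge_pragmas_alt (original_code : String) (llm_code : Option String) : String × Int :=
  let llm_lines : List (List Char) :=
    match llm_code with
    | none => []
    | some s => if s = "" then [] else PySem.Chars.splitOn s.toList ['\n']
  let llm_pragmas : List (List Char) :=
    (llm_lines.filter (fun l => PySem.Chars.isIn pvPrag l)).map PySem.Chars.strip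
  let gp := pvPart (PySem.Chars.splitOn original_code.toList ['\n'])
  let new_prags : List (List Char) :=
    (List.zipWith
      (fun p q => List.replicate (p.length - (PySem.Chars.lstrip p).length) ' ' ++ q)
      gp.2 llm_pragmas) ++ gp.2.drop llm_pragmas.length
  let merged := gp.1.headD [] ++ pvWeave new_prags gp.1.tail
  (String.ofList (PySem.Chars.join ['\n'] merged),
   max 0 ((llm_pragmas.length : Int) - (gp.2.length : Int)))

-- ===== PRECONDITION & SPEC =====
def Spec_merge_pragmas (original_code : String) (llm_code : Option String) (out : String × Int) : Prop := out = merge_pragmas_alt original_code llm_code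
instance (original_code : String) (llm_code : Option String) (out : String × Int) : Decidable (Spec_merge_pragmas original_code llm_code out) := by unfold Spec_merge_pragmas; infer_instance

-- ===== CLAIM (what is proved, stated in full; the proofs are below) =====
def Claim_equal_merge_pragmas : Prop := ∀ (original_code : String) (llm_code : Option String), Dom_merge_pragmas original_code llm_code → Spec_merge_pragmas original_code llm_code (merge_pragmas original_code llm_code)

-- ===== LEMMAS AND PROOFS =====

-- pragma positions of `lines`, absolute from start `s` (what A's first foldl computes)
def pvPos (lines : List (List Char)) (s : Int) : List Int :=
  ((PySem.List.enumerate lines s).filter (fun ip => PySem.Chars.isIn pvPrag ip.2)).map (·.1)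

-- proof-only intermediate: a single-pass description of A's replacement (idx into P, count)
def pvWalk (P : List (List Char)) : List (List Char) → Nat → Nat → List (List Char) × Nat
  | [], _idx, count => ([], count)
  | l :: rest, idx, count =>
    if PySem.Chars.isIn pvPrag l then
      if idx < P.length then
        let out := pvWalk P rest (idx + 1) (count + 1)
        ((List.replicate (l.length - (PySem.Chars.lstrip l).length) ' ' ++ P.getD idx []) :: out.1, out.2)
      else
        let out := pvWalk P rest idx (count + 1)
        (l :: out.1, out.2)
    else
      let out := pvWalk P rest idx count
      (l :: out.1, out.2)

theorem pvPos_cons (l : List Char) (r : List (List Char)) (s : Int) :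
    pvPos (l :: r) s =
      (if PySem.Chars.isIn pvPrag l then [s] else []) ++ pvPos r (s + 1) := by
  simp only [pvPos, PySem.List.enumerate_cons, List.filter_cons]
  by_cases h : PySem.Chars.isIn pvPrag l <;> simp [h]

theorem pvPos_length (r : List (List Char)) (s : Int) :
    (pvPos r s).length = r.countP (fun l => PySem.Chars.isIn pvPrag l) := by
  induction r generalizing s with
  | nil => rfl
  | cons l r ih =>
    rw [pvPos_cons, List.countP_cons]
    by_cases h : PySem.Chars.isIn pvPrag l <;> simp [h, ih]

theorem pvWalk_fst_id (P : List (List Char)) (r : List (List Char)) (j c : Nat)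
    (hj : P.length ≤ j) : (pvWalk P r j c).1 = r := by
  induction r generalizing c with
  | nil => rfl
  | cons l r ih =>
    rw [pvWalk]
    by_cases h : PySem.Chars.isIn pvPrag l
    · simp only [h, if_true, if_neg (Nat.not_lt.mpr hj)]; rw [ih]
    · simp only [if_neg h]; rw [ih]

theorem pvGetD_mid (pre r : List (List Char)) (l : List Char) (d : List Char) :
    (pre ++ l :: r).getD pre.length d = l := by
  induction pre with
  | nil => rfl
  | cons x xs _ => simp

theorem pvSet_mid (m r : List (List Char)) (l v : List Char) :
    (m ++ l :: r).set m.length v = m ++ v :: r := by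
  induction m with
  | nil => rfl
  | cons x xs ih => simp [ih]

-- A's indexed replacement fold over the position list equals the single-pass walk
theorem pvMain (P : List (List Char)) (r pre m : List (List Char)) (j c : Nat)
    (hm : m.length = pre.length) :
    (PySem.List.enumerate (pvPos r (pre.length : Int)) (j : Int)).foldl
      (fun acc kp =>
        if kp.1 < (P.length : Int) then
          let line := PySem.List.pyGetD (pre ++ r) kp.2 []
          let indent := line.length - (PySem.Chars.lstrip line).length
          PySem.List.pySetD acc kp.2 (List.replicate indent ' ' ++ PySem.List.pyGetD P kp.1 [])
        else acc) (m ++ r)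
    = m ++ (pvWalk P r j c).1 := by
  induction r generalizing pre m j c with
  | nil => simp [pvPos, pvWalk]
  | cons l r ih =>
    rw [pvPos_cons]
    by_cases h : PySem.Chars.isIn pvPrag l
    · by_cases hj : j < P.length
      · simp only [h, if_true, List.singleton_append, PySem.List.enumerate_cons, List.foldl_cons]
        rw [if_pos (by exact_mod_cast hj)]
        simp only [PySem.List.pyGetD_natCast, PySem.List.pySetD_natCast]
        rw [pvGetD_mid, ← hm, pvSet_mid]
        have h1 : (pre.length : Int) + 1 = ((pre ++ [l]).length : Int) := by simp
        have h2 : (j : Int) + 1 = ((j + 1 : Nat) : Int) := by norm_cast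
        rw [hm, h1, h2]
        have := ih (pre := pre ++ [l])
          (m := m ++ [List.replicate (l.length - (PySem.Chars.lstrip l).length) ' ' ++ P.getD j []])
          (j := j + 1) (c := c + 1) (by simp [hm])
        simp only [List.append_assoc, List.cons_append, List.nil_append] at this ⊢
        rw [this, pvWalk, if_pos h, if_pos hj]
      · simp only [h, if_true, List.singleton_append, PySem.List.enumerate_cons, List.foldl_cons]
        rw [if_neg (by exact_mod_cast hj)]
        have h1 : (pre.length : Int) + 1 = ((pre ++ [l]).length : Int) := by simp
        have h2 : (j : Int) + 1 = ((j + 1 : Nat) : Int) := by norm_cast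
        rw [h1, h2]
        have := ih (pre := pre ++ [l]) (m := m ++ [l]) (j := j + 1) (c := c + 1) (by simp [hm])
        simp only [List.append_assoc, List.cons_append, List.nil_append] at this ⊢
        rw [this, pvWalk_fst_id P r (j + 1) (c + 1) (by omega)]
        simp [pvWalk, h, hj, pvWalk_fst_id P r j (c + 1) (by omega)]
    · rw [if_neg h, List.nil_append]
      have h1 : (pre.length : Int) + 1 = ((pre ++ [l]).length : Int) := by simp
      rw [h1]
      have := ih (pre := pre ++ [l]) (m := m ++ [l]) (j := j) (c := c) (by simp [hm])
      simp only [List.append_assoc, List.cons_append, List.nil_append] at this ⊢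
      rw [this]
      simp [pvWalk, h]

theorem pvPart_fst_ne_nil (r : List (List Char)) : (pvPart r).1 ≠ [] := by
  cases r with
  | nil => simp [pvPart]
  | cons l r =>
    rw [pvPart]
    by_cases h : PySem.Chars.isIn pvPrag l <;> simp [h]

theorem pvPart_snd (r : List (List Char)) :
    (pvPart r).2 = r.filter (fun l => PySem.Chars.isIn pvPrag l) := by
  induction r with
  | nil => rfl
  | cons l r ih =>
    rw [pvPart, List.filter_cons]
    by_cases h : PySem.Chars.isIn pvPrag l <;> simp [h, ih]

-- B's partition/zip/interleave equals the single-pass walk (with P advanced by drop j)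
set_option maxRecDepth 4000 in
theorem pvBridge (P : List (List Char)) (r : List (List Char)) (j c : Nat) :
    (pvWalk P r j c).1 =
      (pvPart r).1.headD [] ++
        pvWeave
          ((List.zipWith
            (fun p q => List.replicate (p.length - (PySem.Chars.lstrip p).length) ' ' ++ q)
            (pvPart r).2 (P.drop j)) ++ (pvPart r).2.drop (P.drop j).length)
          (pvPart r).1.tail := by
  induction r generalizing j c with
  | nil => simp [pvWalk, pvPart, pvWeave]
  | cons l r ih =>
    obtain ⟨g0, gs', hgs⟩ : ∃ g0 gs', (pvPart r).1 = g0 :: gs' := by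
      cases hc : (pvPart r).1 with
      | nil => exact absurd hc (pvPart_fst_ne_nil r)
      | cons a b => exact ⟨a, b, rfl⟩
    rw [pvWalk, pvPart]
    by_cases h : PySem.Chars.isIn pvPrag l
    · by_cases hj : j < P.length
      · have hdrop : P.drop j = P.getD j [] :: P.drop (j + 1) := by
          rw [List.drop_eq_getElem_cons hj, List.getD_eq_getElem P [] hj]
        simp only [h, if_true, if_pos hj, hdrop, hgs, List.zipWith_cons_cons,
          List.cons_append, List.headD_cons, List.tail_cons, pvWeave]
        rw [ih (j + 1) (c + 1)]
        simp [hgs]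
      · have hdrop : P.drop j = [] := List.drop_eq_nil_of_le (by omega)
        simp only [h, if_true, if_neg hj, hdrop, hgs, List.zipWith_nil_right,
          List.length_nil, List.drop_zero, List.nil_append, List.headD_cons,
          List.tail_cons, pvWeave]
        rw [ih j (c + 1)]
        simp [hgs, hdrop]
    · simp only [if_neg h, hgs, List.headD_cons, List.tail_cons, List.cons_append]
      rw [ih j c]
      simp [hgs]

-- ===== VERDICT (by name: the statement is the Claim_ definition above) =====
theorem merge_pragmas_spec : Claim_equal_merge_pragmas := by
  intro oc lc hdom
  clear hdom
  unfold Spec_merge_pragmas merge_pragmas merge_pragmas_alt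
  dsimp only
  set P : List (List Char) := ((match lc with
      | none => ([] : List (List Char))
      | some s => if s = "" then [] else PySem.Chars.splitOn s.toList ['\n']).filter
        (fun l => PySem.Chars.isIn pvPrag l)).map PySem.Chars.strip with hPdef
  set L : List (List Char) := PySem.Chars.splitOn oc.toList ['\n'] with hLdef
  -- A's position list is pvPos L 0
  have hpos : (PySem.List.enumerate L 0).foldl
      (fun acc ip => if PySem.Chars.isIn pvPrag ip.2 then acc ++ [ip.1] else acc)
      ([] : List Int) = pvPos L 0 := by
    rw [PySem.List.foldl_append_if]; rfl
  rw [hpos]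
  have hmerged : (PySem.List.enumerate (pvPos L 0) 0).foldl
      (fun m kp =>
        if kp.1 < (P.length : Int) then
          let line := PySem.List.pyGetD L kp.2 []
          let indent := line.length - (PySem.Chars.lstrip line).length
          PySem.List.pySetD m kp.2 (List.replicate indent ' ' ++ PySem.List.pyGetD P kp.1 [])
        else m) L = (pvWalk P L 0 0).1 := by
    have := pvMain P L [] [] 0 0 rfl
    simpa using this
  rw [hmerged, pvBridge P L 0 0]
  -- the extra-pragmas count
  have hlen : (pvPos L 0).length = (pvPart L).2.length := by
    simp [pvPos_length, pvPart_snd, List.countP_eq_length_filter]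
  have hcnt : ((PySem.List.slice P (some ((pvPos L 0).length : Int)) none).length : Int) =
      max 0 ((P.length : Int) - ((pvPart L).2.length : Int)) := by
    rw [PySem.List.slice_some_none, PySem.List.clampIdx_natCast, hlen, List.length_drop]
    omega
  rw [hcnt]
  simp
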